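-- pv_equiv track=rewrite | github.com/jmsenosa/topic-extractor | eb-mw-topic-extractor/determine_duplicates.py | mapping_out_date_duplicates
-- ===== SOURCE A (Python) =====
-- def mapping_out_date_duplicates(topics, certain_duplicates, universal_duplicates, debug_messages):
--     months = ('January', 'February', 'March', 'April', 'May', 'June', 'July', 'August', 'September', 'October', 'November', 'December')
--
--     topic_with_months = {}
--
--     for month in months:
--         for topic in topics:
--             if month == topic[0].split()[0]:
--                 try:
--                     topic_with_months[month].append(topic)
--                 except KeyError:
--                     topic_with_months[month] = []
--                     topic_with_months[month].append(topic)
--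
--     for topic in topic_with_months:
--         month_name = topic
--         main_date = ()
--         duplicate_date = ()
--         if len(topic_with_months[topic]) == 2:
--             for duplicate in topic_with_months[topic]:
--                 if duplicate[0] == month_name:
--                     duplicate_date = duplicate
--                 else:
--                     main_date = duplicate
--             if main_date and duplicate_date:
--                 certain_duplicates.append((main_date[0], duplicate_date))
--                 universal_duplicates.append(duplicate_date[0])
--                 topics.remove(duplicate_date)
--         elif len(topic_with_months[topic]) > 2: # if topic is more than 2, remove the topic with month only | eg: April & April 9 & April 12 & April 2014 => April should be removed
--             for duplicate in topic_with_months[topic]: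
--                 if duplicate[0] == topic:
--                     removed_topic = topics.remove(duplicate)
--                     break
--     return (topics, certain_duplicates, universal_duplicates, debug_messages)
-- ===== SOURCE B (Python) =====
-- def mapping_out_date_duplicates(topics, certain_duplicates, universal_duplicates, debug_messages):
--     months = ('January', 'February', 'March', 'April', 'May', 'June', 'July',
--               'August', 'September', 'October', 'November', 'December')
--     index = {m: i for i, m in enumerate(months)}
--
--     # One streaming pass: per-month summary statistics, no group lists ever built:
--     # (count, first bare-month entry, last bare-month entry, last dated entry)
--     stats = [(0, None, None, None)] * 12
--     for t in topics:
--         first = t[0].split()[0]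
--         i = index.get(first)
--         if i is None:
--             continue
--         c, fb, lb, lo = stats[i]
--         if t[0] == first:
--             stats[i] = (c + 1, fb if fb is not None else t, t, lo)
--         else:
--             stats[i] = (c + 1, fb, lb, t)
--
--     for i in range(12):
--         c, fb, lb, lo = stats[i]
--         if c == 2:
--             if lb is not None and lo is not None:
--                 certain_duplicates.append((lo[0], lb))
--                 universal_duplicates.append(lb[0])
--                 topics.remove(lb)
--         elif c > 2:
--             if fb is not None:
--                 topics.remove(fb)
--     return (topics, certain_duplicates, universal_duplicates, debug_messages)
-- ===== Notes on version B (the rewrite author's own statement) =====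
-- stated objective: alternative
-- what changed: B never builds per-month group lists at all: one streaming pass keeps, in a fixed 12-slot array indexed by month number, only four summary statistics per month (count, first bare-month entry, last bare-month entry, last dated entry), and the second loop over indices 0..11 decides each action directly from those statistics instead of re-scanning a group.
import Mathlib
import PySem

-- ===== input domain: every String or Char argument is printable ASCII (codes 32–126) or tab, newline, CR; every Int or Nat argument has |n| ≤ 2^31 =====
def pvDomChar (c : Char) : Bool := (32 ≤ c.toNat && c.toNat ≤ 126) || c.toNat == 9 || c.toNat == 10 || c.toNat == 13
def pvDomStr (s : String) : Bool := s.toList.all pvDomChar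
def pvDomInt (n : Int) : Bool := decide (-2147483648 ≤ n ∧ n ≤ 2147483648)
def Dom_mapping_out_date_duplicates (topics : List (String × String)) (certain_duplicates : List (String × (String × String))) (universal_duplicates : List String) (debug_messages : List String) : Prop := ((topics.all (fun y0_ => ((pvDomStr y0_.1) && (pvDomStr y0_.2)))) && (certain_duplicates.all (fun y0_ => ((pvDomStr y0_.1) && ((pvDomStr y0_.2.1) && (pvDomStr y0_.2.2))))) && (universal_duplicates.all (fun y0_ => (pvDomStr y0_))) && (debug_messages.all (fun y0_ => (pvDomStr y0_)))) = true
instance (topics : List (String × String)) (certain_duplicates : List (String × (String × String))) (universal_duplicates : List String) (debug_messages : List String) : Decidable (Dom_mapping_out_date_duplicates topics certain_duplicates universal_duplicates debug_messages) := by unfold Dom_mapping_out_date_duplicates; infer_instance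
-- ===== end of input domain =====

-- B replaces A's per-month group lists entirely: one streaming pass over topics keeps, in a fixed
-- 12-slot array indexed by month number, four summary statistics per month (count, first bare entry,
-- last bare entry, last dated entry), and a loop over indices 0..11 acts on those statistics alone;
-- objective: alternative (same measured cost). Equivalence is about the RETURN value; both Pythons
-- mutate topics/certain_duplicates/universal_duplicates in place in the same way.


-- ===== PORT A =====
-- topic[0].split()[0]: exact whenever split() is nonempty (Pre_ excludes the IndexError inputs)
def pvFirstWord (s : String) : String := (PySem.Str.split₀ s).headD ""

-- topics.remove(v): exact when v ∈ l; both programs only remove elements they drew from the list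
def pvRemove (l : List (String × String)) (v : String × String) : List (String × String) :=
  (PySem.List.remove? l v).getD l

def pvMonths : List String :=
  ["January", "February", "March", "April", "May", "June", "July",
   "August", "September", "October", "November", "December"]

-- inner loop body: if month == topic[0].split()[0]: try append / except KeyError: = [] then append
def pvA_inner (month : String) (d : PySem.Dict String (List (String × String)))
    (t : String × String) : PySem.Dict String (List (String × String)) :=
  if month == pvFirstWord t.1 then
    match d.get? month with
    | some l => d.insert month (l ++ [t])
    | none   => d.insert month [t]
  else d

def pvBuildA (topics : List (String × String)) : PySem.Dict String (List (String × String)) :=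
  pvMonths.foldl (fun d month => topics.foldl (pvA_inner month) d) PySem.Dict.empty

-- body of A's second loop; the `for duplicate in …` with overwriting assignments is a fold over a
-- pair of Options (empty tuple = none), the for+break search is find?
def pvStepA (st : List (String × String) × List (String × (String × String)) × List String)
    (kg : String × List (String × String)) :
    List (String × String) × List (String × (String × String)) × List String :=
  let k := kg.1; let g := kg.2
  let ts := st.1; let cd := st.2.1; let ud := st.2.2
  if g.length == 2 then
    let md := g.foldl (fun (md : Option (String × String) × Option (String × String)) dd =>
      if dd.1 == k then (md.1, some dd) else (some dd, md.2)) (none, none)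
    match md.1, md.2 with
    | some m, some du => (pvRemove ts du, cd ++ [(m.1, du)], ud ++ [du.1])
    | _, _ => (ts, cd, ud)
  else if 2 < g.length then
    match g.find? (fun dd => dd.1 == k) with
    | some du => (pvRemove ts du, cd, ud)
    | none => (ts, cd, ud)
  else (ts, cd, ud)

def mapping_out_date_duplicates (topics : List (String × String)) (certain_duplicates : List (String × (String × String))) (universal_duplicates : List String) (debug_messages : List String) : (List (String × String)) × (List (String × (String × String))) × List String × List String :=
  let d := pvBuildA topics
  -- `for topic in topic_with_months` reads d[topic]; d is not mutated there, so iterating items is exact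
  let r := d.items.foldl pvStepA (topics, certain_duplicates, universal_duplicates)
  (r.1, r.2.1, r.2.2, debug_messages)

-- ===== PORT B =====
-- index = {m: i for i, m in enumerate(months)}  (values are 0..11; kept as Nat list indices)
def pvIndex : PySem.Dict String Nat :=
  (PySem.List.enumerate pvMonths).foldl (fun d p => d.insert p.2 p.1.toNat) PySem.Dict.empty

-- stats = [(0, None, None, None)] * 12   -- (count, first bare, last bare, last dated)
def pvInit : List (Nat × Option (String × String) × Option (String × String) × Option (String × String)) :=
  List.replicate 12 (0, none, none, none)

-- body of B's streaming pass: i = index.get(first); skip if None, else update the four statistics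
def pvUpd (st : List (Nat × Option (String × String) × Option (String × String) × Option (String × String)))
    (t : String × String) :
    List (Nat × Option (String × String) × Option (String × String) × Option (String × String)) :=
  match pvIndex.get? (pvFirstWord t.1) with
  | none => st
  | some i => st.modify i (fun s =>
      if t.1 == pvFirstWord t.1 then
        (s.1 + 1, (match s.2.1 with | some x => some x | none => some t), some t, s.2.2.2)
      else (s.1 + 1, s.2.1, s.2.2.1, some t))

-- body of B's second loop: act on the i-th statistics tuple alone
def pvStep2 (stats : List (Nat × Option (String × String) × Option (String × String) × Option (String × String)))
    (st : List (String × String) × List (String × (String × String)) × List String)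
    (i : Nat) :
    List (String × String) × List (String × (String × String)) × List String :=
  let s := stats.getD i (0, none, none, none)
  let ts := st.1; let cd := st.2.1; let ud := st.2.2
  if s.1 == 2 then
    match s.2.2.1, s.2.2.2 with
    | some lb, some lo => (pvRemove ts lb, cd ++ [(lo.1, lb)], ud ++ [lb.1])
    | _, _ => (ts, cd, ud)
  else if 2 < s.1 then
    match s.2.1 with
    | some fb => (pvRemove ts fb, cd, ud)
    | none => (ts, cd, ud)
  else (ts, cd, ud)

def mapping_out_date_duplicates_alt (topics : List (String × String)) (certain_duplicates : List (String × (String × String))) (universal_duplicates : List String) (debug_messages : List String) : (List (String × String)) × (List (String × (String × String))) × List String × List String :=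
  let stats := topics.foldl pvUpd pvInit
  let r := (List.range 12).foldl (pvStep2 stats) (topics, certain_duplicates, universal_duplicates)
  (r.1, r.2.1, r.2.2, debug_messages)

-- ===== PRECONDITION & SPEC =====
-- Pre_ excludes topics whose first string is empty or all whitespace: there `topic[0].split()[0]`
-- raises IndexError in A (and in B alike).
def Pre_mapping_out_date_duplicates (topics : List (String × String)) (certain_duplicates : List (String × (String × String))) (universal_duplicates : List String) (debug_messages : List String) : Prop :=
  ∀ t ∈ topics, PySem.Str.split₀ t.1 ≠ []
instance (topics : List (String × String)) (certain_duplicates : List (String × (String × String))) (universal_duplicates : List String) (debug_messages : List String) : Decidable (Pre_mapping_out_date_duplicates topics certain_duplicates universal_duplicates debug_messages) := by unfold Pre_mapping_out_date_duplicates; infer_instance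

def pvWitness_mapping_out_date_duplicates : (List (String × String)) × (List (String × (String × String))) × List String × List String :=
  ([("April", "a"), ("April 9", "b"), ("May 1", "c")], [], [], [])

def Spec_mapping_out_date_duplicates (topics : List (String × String)) (certain_duplicates : List (String × (String × String))) (universal_duplicates : List String) (debug_messages : List String) (out : (List (String × String)) × (List (String × (String × String))) × List String × List String) : Prop := out = mapping_out_date_duplicates_alt topics certain_duplicates universal_duplicates debug_messages
instance (topics : List (String × String)) (certain_duplicates : List (String × (String × String))) (universal_duplicates : List String) (debug_messages : List String) (out : (List (String × String)) × (List (String × (String × String))) × List String × List String) : Decidable (Spec_mapping_out_date_duplicates topics certain_duplicates universal_duplicates debug_messages out) := by unfold Spec_mapping_out_date_duplicates; infer_instance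

-- ===== CLAIM (what is proved, stated in full; the proofs are below) =====
def Claim_equal_mapping_out_date_duplicates : Prop := ∀ (topics : List (String × String)) (certain_duplicates : List (String × (String × String))) (universal_duplicates : List String) (debug_messages : List String), Dom_mapping_out_date_duplicates topics certain_duplicates universal_duplicates debug_messages → Pre_mapping_out_date_duplicates topics certain_duplicates universal_duplicates debug_messages → Spec_mapping_out_date_duplicates topics certain_duplicates universal_duplicates debug_messages (mapping_out_date_duplicates topics certain_duplicates universal_duplicates debug_messages)

-- ===== LEMMAS AND PROOFS =====

-- the topics whose first word is the given month, in list order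
def pvGroup (m : String) (ts : List (String × String)) : List (String × String) :=
  ts.filter (fun t => m == pvFirstWord t.1)

-- B's per-element statistics update, specialised to a month (inside a group first word = m)
def pvAcc (m : String)
    (s : Nat × Option (String × String) × Option (String × String) × Option (String × String))
    (t : String × String) :
    Nat × Option (String × String) × Option (String × String) × Option (String × String) :=
  if t.1 == m then
    (s.1 + 1, (match s.2.1 with | some x => some x | none => some t), some t, s.2.2.2)
  else (s.1 + 1, s.2.1, s.2.2.1, some t)

-- ----- characterisation of pvIndex.get? -----
lemma pvIndex_month : ∀ i, i < 12 → pvIndex.get? (pvMonths.getD i "") = some i := by decide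

lemma pvIndex_keys : pvIndex.keys = pvMonths := by decide

lemma pvIndex_none {s : String} (h : pvIndex.get? s = none) : s ∉ pvMonths := by
  intro hs
  rw [← pvIndex_keys] at hs
  have hc : pvIndex.contains s = true := (PySem.Dict.contains_iff_mem_keys pvIndex s).mpr hs
  have := (PySem.Dict.get?_eq_none_iff_contains pvIndex s).mp h
  rw [this] at hc
  cases hc

lemma pvMonths_nodup : pvMonths.Nodup := by decide

lemma pvIndex_some {s : String} {i : Nat} (h : pvIndex.get? s = some i) :
    i < 12 ∧ pvMonths.getD i "" = s := by
  have hs : s ∈ pvMonths := by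
    rw [← pvIndex_keys]
    refine (PySem.Dict.contains_iff_mem_keys pvIndex s).mp ?_
    cases hc : pvIndex.contains s
    · rw [(PySem.Dict.get?_eq_none_iff_contains pvIndex s).mpr hc] at h; cases h
    · rfl
  obtain ⟨j, hj, hje⟩ := List.getElem_of_mem hs
  have hlen : pvMonths.length = 12 := by decide
  have hgd : pvMonths.getD j "" = s := by
    rw [List.getD_eq_getElem _ _ (by omega)]; exact hje
  have := pvIndex_month j (by omega)
  rw [hgd, h] at this
  cases this
  exact ⟨by omega, hgd⟩

-- ----- pass 1: the i-th statistics slot is a fold of pvAcc over the i-th month's group -----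
lemma pvGroup_cons_pos {m : String} {t : String × String} (h : (m == pvFirstWord t.1) = true)
    (ts : List (String × String)) : pvGroup m (t :: ts) = t :: pvGroup m ts := by
  simp [pvGroup, h]

lemma pvGroup_cons_neg {m : String} {t : String × String} (h : (m == pvFirstWord t.1) = false)
    (ts : List (String × String)) : pvGroup m (t :: ts) = pvGroup m ts := by
  simp [pvGroup, h]

lemma pvPass1 (ts : List (String × String)) :
    ∀ st : List (Nat × Option (String × String) × Option (String × String) × Option (String × String)),
      st.length = 12 → ∀ i, i < 12 →
      (ts.foldl pvUpd st).getD i (0, none, none, none) =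
        (pvGroup (pvMonths.getD i "") ts).foldl (pvAcc (pvMonths.getD i ""))
          (st.getD i (0, none, none, none)) := by
  induction ts with
  | nil => intro st _ i _; simp [pvGroup]
  | cons t ts ih =>
    intro st hlen i hi
    rw [List.foldl_cons]
    cases hg : pvIndex.get? (pvFirstWord t.1) with
    | none =>
      have hstep : pvUpd st t = st := by unfold pvUpd; rw [hg]
      
      have hmem : pvMonths.getD i "" ∈ pvMonths := by
        have : pvMonths.length = 12 := by decide
        rw [List.getD_eq_getElem _ _ (by omega)]
        exact List.getElem_mem _
      have hne : (pvMonths.getD i "" == pvFirstWord t.1) = false := by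
        rw [beq_eq_false_iff_ne]
        intro e
        exact pvIndex_none hg (e ▸ hmem)
      rw [hstep, ih st hlen i hi, pvGroup_cons_neg hne]
    | some j =>
      obtain ⟨hj, hje⟩ := pvIndex_some hg
      have hstep : pvUpd st t = st.modify j (fun s => pvAcc (pvFirstWord t.1) s t) := by
        unfold pvUpd pvAcc; rw [hg]
      rw [hstep]
      have hlen' : (st.modify j (fun s => pvAcc (pvFirstWord t.1) s t)).length = 12 := by
        simpa using hlen
      rw [ih _ hlen' i hi]
      by_cases hij : i = j
      · subst hij
        have heq : (pvMonths.getD i "" == pvFirstWord t.1) = true := by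
          rw [hje]; exact beq_self_eq_true _
        rw [pvGroup_cons_pos heq, List.foldl_cons]
        have hget : (st.modify i (fun s => pvAcc (pvFirstWord t.1) s t)).getD i (0, none, none, none)
            = pvAcc (pvFirstWord t.1) (st.getD i (0, none, none, none)) t := by
          have hi' : i < st.length := by omega
          rw [List.getD_eq_getElem _ _ (by simpa using hi'), List.getElem_modify,
              List.getD_eq_getElem _ _ hi']
          simp
        rw [hget, hje]
      · have hne : (pvMonths.getD i "" == pvFirstWord t.1) = false := by
          rw [beq_eq_false_iff_ne]
          intro e
          apply hij
          have h12 : pvMonths.length = 12 := by decide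
          have : pvMonths.getD i "" = pvMonths.getD j "" := by rw [hje, e]
          rw [List.getD_eq_getElem _ _ (by omega), List.getD_eq_getElem _ _ (by omega)] at this
          exact pvMonths_nodup.getElem_inj_iff.mp this
      
        rw [pvGroup_cons_neg hne]
        congr 1
        have hi' : i < st.length := by omega
        rw [List.getD_eq_getElem _ _ (by simpa using hi'), List.getElem_modify,
            List.getD_eq_getElem _ _ hi']
        simp [Ne.symm hij]

-- ----- the statistics fold computes (length, find?, A's overwrite pair) -----
lemma pvSumm_fold (m : String) (g : List (String × String)) :
    ∀ c fb lb lo,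
      g.foldl (pvAcc m) (c, fb, lb, lo) =
        (c + g.length,
         (match fb with | some x => some x | none => g.find? (fun t => t.1 == m)),
         (g.foldl (fun (md : Option (String × String) × Option (String × String)) dd =>
            if dd.1 == m then (md.1, some dd) else (some dd, md.2)) (lo, lb)).2,
         (g.foldl (fun (md : Option (String × String) × Option (String × String)) dd =>
            if dd.1 == m then (md.1, some dd) else (some dd, md.2)) (lo, lb)).1) := by
  induction g with
  | nil => intro c fb lb lo; cases fb <;> simp
  | cons a g ih =>
    intro c fb lb lo
    rw [List.foldl_cons, List.foldl_cons]
    by_cases ha : (a.1 == m) = true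
    · rw [show pvAcc m (c, fb, lb, lo) a
          = (c + 1, (match fb with | some x => some x | none => some a), some a, lo) by
        simp [pvAcc, ha]]
      rw [ih]
      have hfind : (a :: g).find? (fun t => t.1 == m) = some a := by
        rw [List.find?_cons_of_pos (p := fun (t : String × String) => t.1 == m) ha]
      cases fb <;> simp [ha, hfind, Nat.add_assoc, Nat.add_comm 1 g.length]
    · rw [show pvAcc m (c, fb, lb, lo) a = (c + 1, fb, lb, some a) by
        simp [pvAcc, ha]]
      rw [ih]
      have hfind : (a :: g).find? (fun t => t.1 == m) = g.find? (fun t => t.1 == m) := by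
        rw [List.find?_cons_of_neg (p := fun (t : String × String) => t.1 == m) (by simp [ha])]
      cases fb <;> simp [ha, hfind, Nat.add_assoc, Nat.add_comm 1 g.length]

-- ----- B's per-index step on the summary = A's per-group step -----
lemma pvStep2_eq_stepA (m : String) (g : List (String × String))
    (stats : List (Nat × Option (String × String) × Option (String × String) × Option (String × String)))
    (i : Nat)
    (hstat : stats.getD i (0, none, none, none) = g.foldl (pvAcc m) (0, none, none, none))
    (st : List (String × String) × List (String × (String × String)) × List String) :
    pvStep2 stats st i = pvStepA st (m, g) := by
  unfold pvStep2 pvStepA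
  rw [hstat, pvSumm_fold]
  simp only [Nat.zero_add]
  by_cases h2 : g.length = 2
  · rcases hp : List.foldl (fun (md : Option (String × String) × Option (String × String)) dd =>
        if dd.1 == m then (md.1, some dd) else (some dd, md.2)) (none, none) g with ⟨mo, du⟩
    simp only [hp, h2]
    cases mo <;> cases du <;> simp
  · by_cases h3 : 2 < g.length
    · have : (g.length == 2) = false := by simp [h2]
      simp [this, h3]
    · have hb : (g.length == 2) = false := by simp [h2]
      simp [hb, h3]

lemma pvStepA_nil (st : List (String × String) × List (String × (String × String)) × List String)
    (m : String) : pvStepA st (m, []) = st := by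
  simp [pvStepA]

-- ----- A-side grouping characterisation (as in the dict build) -----
lemma pvA_inner_step (m : String) (d : PySem.Dict String (List (String × String)))
    (t : String × String) :
    pvA_inner m d t = if m == pvFirstWord t.1 then d.insert m (d.getD m [] ++ [t]) else d := by
  unfold pvA_inner
  cases h : d.get? m <;>
    simp [h, PySem.Dict.getD_eq_get?_getD]

lemma pvA_inner_fold (ts : List (String × String)) (m : String)
    (d : PySem.Dict String (List (String × String))) :
    ts.foldl (pvA_inner m) d =
      if pvGroup m ts = [] then d else d.insert m (d.getD m [] ++ pvGroup m ts) := by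
  induction ts generalizing d with
  | nil => simp [pvGroup]
  | cons t ts ih =>
    by_cases h : (m == pvFirstWord t.1) = true
    · have hg : pvGroup m (t :: ts) = t :: pvGroup m ts := by simp [pvGroup, h]
      rw [List.foldl_cons, pvA_inner_step, if_pos h, ih, hg]
      by_cases he : pvGroup m ts = []
      · simp [he]
      · rw [if_neg he, if_neg (by simp)]
        rw [PySem.Dict.getD_insert_self, PySem.Dict.insert_insert_self, List.append_assoc]
        simp
    · have hg : pvGroup m (t :: ts) = pvGroup m ts := by simp [pvGroup, h]
      rw [List.foldl_cons, pvA_inner_step, if_neg h, ih, hg]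

lemma pvBuildA_aux (topics : List (String × String)) :
    ∀ (ms : List String) (d : PySem.Dict String (List (String × String))),
      ms.Nodup → (∀ m ∈ ms, d.contains m = false) →
      (ms.foldl (fun d m => topics.foldl (pvA_inner m) d) d).items =
        d.items ++ (ms.filter (fun m => !(pvGroup m topics).isEmpty)).map
          (fun m => (m, pvGroup m topics)) := by
  intro ms
  induction ms with
  | nil => intro d _ _; simp
  | cons m ms ih =>
    intro d hnd hc
    rw [List.foldl_cons, pvA_inner_fold]
    by_cases he : pvGroup m topics = []
    · rw [if_pos he]
      rw [ih d hnd.of_cons (fun m' hm' => hc m' (List.mem_cons_of_mem _ hm'))]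
      simp [he]
    · rw [if_neg he]
      have hcm : d.contains m = false := hc m (List.mem_cons_self ..)
      rw [PySem.Dict.getD_of_not_contains d [] hcm]
      have hc' : ∀ m' ∈ ms, (d.insert m (List.nil ++ pvGroup m topics)).contains m' = false := by
        intro m' hm'
        rw [PySem.Dict.contains_insert]
        have : m' ≠ m := by rintro rfl; exact (List.nodup_cons.mp hnd).1 hm'
        simp [this, hc m' (List.mem_cons_of_mem _ hm')]
      rw [ih _ hnd.of_cons hc']
      rw [PySem.Dict.items_insert_of_not_contains d _ hcm]
      simp [he]

lemma pvBuildA_items (topics : List (String × String)) :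
    (pvBuildA topics).items =
      (pvMonths.filter (fun m => !(pvGroup m topics).isEmpty)).map
        (fun m => (m, pvGroup m topics)) := by
  unfold pvBuildA
  rw [pvBuildA_aux topics pvMonths PySem.Dict.empty pvMonths_nodup
    (fun m _ => by simp [PySem.Dict.contains_empty])]
  rw [show (PySem.Dict.empty : PySem.Dict String (List (String × String))).items = [] from rfl]
  simp

-- ----- assembling both sides into the same fold over pvMonths -----
lemma pvA_core (topics : List (String × String))
    (st : List (String × String) × List (String × (String × String)) × List String) :
    (pvBuildA topics).items.foldl pvStepA st =
      pvMonths.foldl (fun st m => pvStepA st (m, pvGroup m topics)) st := by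
  rw [pvBuildA_items, List.foldl_map, ← PySem.List.foldl_if_eq_foldl_filter]
  apply PySem.List.foldl_congr_mem
  intro acc m _
  by_cases he : (pvGroup m topics).isEmpty = true
  · rw [if_neg (by simp [he]), List.isEmpty_iff.mp he, pvStepA_nil]
  · rw [if_pos (by simp at he ⊢; exact he)]

lemma pvB_core (topics : List (String × String))
    (st : List (String × String) × List (String × (String × String)) × List String) :
    (List.range 12).foldl (pvStep2 (topics.foldl pvUpd pvInit)) st =
      pvMonths.foldl (fun st m => pvStepA st (m, pvGroup m topics)) st := by
  have hmap : pvMonths = (List.range 12).map (fun i => pvMonths.getD i "") := by decide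
  conv_rhs => rw [hmap]
  rw [List.foldl_map]
  apply PySem.List.foldl_congr_mem
  intro acc i hi
  have hi12 : i < 12 := List.mem_range.mp hi
  have hinit : pvInit.getD i (0, none, none, none) = (0, none, none, none) := by
    unfold pvInit
    rw [List.getD_eq_getElem _ _ (by simp [hi12])]
    exact List.getElem_replicate _
  exact pvStep2_eq_stepA (pvMonths.getD i "") (pvGroup (pvMonths.getD i "") topics) _ i
    (by rw [pvPass1 topics pvInit (by decide) i hi12, hinit]) acc

lemma pvMain_eq (topics : List (String × String)) (cd : List (String × (String × String)))
    (ud : List String) (dm : List String) :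
    mapping_out_date_duplicates topics cd ud dm =
      mapping_out_date_duplicates_alt topics cd ud dm := by
  unfold mapping_out_date_duplicates mapping_out_date_duplicates_alt
  simp only [pvA_core, pvB_core]

-- ===== VERDICT (by name: the statement is the Claim_ definition above) =====
theorem mapping_out_date_duplicates_spec : Claim_equal_mapping_out_date_duplicates := by
  intro topics cd ud dm _ _
  unfold Spec_mapping_out_date_duplicates
  exact pvMain_eq topics cd ud dm
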